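-- pv_equiv track=rewrite | github.com/popowu/construct_TFIDF | tweets_word_count_map.py | removeRT
-- ===== SOURCE A (Python) =====
-- def removeRT(tweet): #if RT: then discard this tweet
--     result = ''
--     for i in tweet.split(' '):
--         if i.startswith('rt') or i.startswith('RT'): #remove @ amd #
--             break
--         else:
--             result += i
--             result += ' '
--     return result
-- ===== SOURCE B (Python) =====
-- def removeRT(tweet):
--     # Recursive descent on the raw string: peel off the first word with
--     # str.partition on a single space; never builds the word list.
--     head, sep, tail = tweet.partition(' ')
--     if head.startswith('rt') or head.startswith('RT'):
--         return ''
--     if not sep: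
--         return head + ' '
--     return head + ' ' + removeRT(tail)
-- ===== Notes on version B (the rewrite author's own statement) =====
-- stated objective: alternative
-- what changed: B is a recursive descent on the raw string that peels off one word at a time with str.partition on a single space and prepends it to the recursive result, instead of A's materialize-the-whole-word-list split followed by an iterative loop with break and incremental string accumulation.
import Mathlib
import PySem

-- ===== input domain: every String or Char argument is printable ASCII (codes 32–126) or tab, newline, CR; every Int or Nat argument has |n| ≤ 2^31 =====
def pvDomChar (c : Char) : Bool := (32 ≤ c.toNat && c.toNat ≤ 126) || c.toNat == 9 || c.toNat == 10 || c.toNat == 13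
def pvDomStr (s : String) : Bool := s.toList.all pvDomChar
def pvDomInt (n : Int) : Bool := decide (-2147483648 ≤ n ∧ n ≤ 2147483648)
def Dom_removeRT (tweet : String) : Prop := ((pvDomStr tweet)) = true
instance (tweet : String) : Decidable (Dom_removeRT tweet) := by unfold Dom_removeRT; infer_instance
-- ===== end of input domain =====

-- B replaces A's split-into-list + loop-with-break + incremental accumulation by a
-- recursive descent on the raw string via str.partition(' ') (objective: alternative).

-- ===== PORT A =====
-- the for-loop with break over tweet.split(' '), carrying the accumulated result
def removeRTgo : List (List Char) → List Char → List Char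
  | [], result => result
  | i :: rest, result =>
    if PySem.Chars.startswith i ['r', 't'] || PySem.Chars.startswith i ['R', 'T'] then result
    else removeRTgo rest (result ++ i ++ [' '])

def removeRT (tweet : String) : String :=
  String.ofList (removeRTgo (PySem.Chars.splitOn tweet.toList [' ']) [])

-- ===== PORT B =====
-- hand port of Python str.partition(' ') for the single-char separator ' ':
-- scan to the first space; (before, some after) on a hit, (whole, none) otherwise.
-- Exact: partition returns (s, '', '') when the separator is absent, encoded as none.
def partitionSp : List Char → List Char × Option (List Char)
  | [] => ([], none)
  | c :: rest =>
    if c = ' ' then ([], some rest)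
    else
      let p := partitionSp rest
      (c :: p.1, p.2)

-- termination measure for the recursion in removeRTaltGo (cited in decreasing_by)
theorem partitionSp_some_len : ∀ (s h t : List Char), partitionSp s = (h, some t) → t.length < s.length := by
  intro s
  induction s with
  | nil => intro h t hp; simp [partitionSp] at hp
  | cons c rest ih =>
    intro h t hp
    by_cases hc : c = ' '
    · simp [partitionSp, hc] at hp
      simp [hp.2]
    · rcases hq : partitionSp rest with ⟨h', t'?⟩
      simp [partitionSp, hc, hq] at hp
      cases t'? with
      | none => simp at hp
      | some t' =>
        simp at hp
        have := ih h' t' hq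
        simp [← hp.2]
        omega

-- Source B's recursion: peel off the first word, stop on an rt/RT prefix, else prepend
def removeRTaltGo (s : List Char) : List Char :=
  match hp : partitionSp s with
  | (head, tail?) =>
    if PySem.Chars.startswith head ['r', 't'] || PySem.Chars.startswith head ['R', 'T'] then []
    else
      match tail? with
      | none => head ++ [' ']
      | some t => head ++ ' ' :: removeRTaltGo t
termination_by s.length
decreasing_by exact partitionSp_some_len s head t hp

def removeRT_alt (tweet : String) : String :=
  String.ofList (removeRTaltGo tweet.toList)

-- ===== PRECONDITION & SPEC =====
def Spec_removeRT (tweet : String) (out : String) : Prop := out = removeRT_alt tweet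
instance (tweet : String) (out : String) : Decidable (Spec_removeRT tweet out) := by unfold Spec_removeRT; infer_instance

-- ===== CLAIM (what is proved, stated in full; the proofs are below) =====
def Claim_equal_removeRT : Prop := ∀ (tweet : String), Dom_removeRT tweet → Spec_removeRT tweet (removeRT tweet)

-- ===== LEMMAS AND PROOFS =====

-- reference splitter: split on ' ' as a structural recursion over the characters
def splitSp : List Char → List (List Char)
  | [] => [[]]
  | c :: rest => if c = ' ' then [] :: splitSp rest else (splitSp rest).modifyHead (c :: ·)

theorem splitSp_ne_nil (s : List Char) : splitSp s ≠ [] := by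
  induction s with
  | nil => simp [splitSp]
  | cons c rest ih =>
    simp only [splitSp]
    split_ifs
    · simp
    · cases h : splitSp rest with
      | nil => exact absurd h ih
      | cons a as => simp

theorem splitOn_go_eq (l : List Char) : ∀ (fuel : Nat) (cur : List Char) (acc : List (List Char)),
    l.length + 1 ≤ fuel →
    PySem.Chars.splitOn.go [' '] fuel l cur acc
      = acc.reverse ++ (splitSp l).modifyHead (cur.reverse ++ ·) := by
  induction l with
  | nil =>
    intro fuel cur acc hf
    cases fuel with
    | zero => omega
    | succ f => simp [PySem.Chars.splitOn.go, splitSp]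
  | cons c rest ih =>
    intro fuel cur acc hf
    cases fuel with
    | zero => omega
    | succ f =>
      by_cases hc : c = ' '
      · have hpre : List.isPrefixOf [' '] (c :: rest) = true := by
          simp [List.isPrefixOf, hc]
        rw [show PySem.Chars.splitOn.go [' '] (f + 1) (c :: rest) cur acc
              = PySem.Chars.splitOn.go [' '] f (List.drop 1 (c :: rest)) [] (cur.reverse :: acc) by
            simp [PySem.Chars.splitOn.go, hpre]]
        simp only [List.drop_succ_cons, List.drop_zero]
        rw [ih f [] (cur.reverse :: acc) (by simp at hf ⊢; omega)]
        simp [splitSp, hc]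
        cases h : splitSp rest with
        | nil => exact absurd h (splitSp_ne_nil rest)
        | cons a as => simp
      · have hpre : List.isPrefixOf [' '] (c :: rest) = false := by
          simp [List.isPrefixOf]
          intro h; exact absurd h.symm hc
        rw [show PySem.Chars.splitOn.go [' '] (f + 1) (c :: rest) cur acc
              = PySem.Chars.splitOn.go [' '] f rest (c :: cur) acc by
            simp [PySem.Chars.splitOn.go, hpre]]
        rw [ih f (c :: cur) acc (by simp at hf ⊢; omega)]
        simp only [splitSp, if_neg hc]
        congr 1
        cases h : splitSp rest with
        | nil => exact absurd h (splitSp_ne_nil rest)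
        | cons a as => simp

theorem splitOn_eq_splitSp (s : List Char) :
    PySem.Chars.splitOn s [' '] = splitSp s := by
  rw [PySem.Chars.splitOn, splitOn_go_eq s (s.length + 1) [] [] (by omega)]
  cases h : splitSp s with
  | nil => exact absurd h (splitSp_ne_nil s)
  | cons a as => simp

theorem partitionSp_none (s : List Char) (h : List Char) :
    partitionSp s = (h, none) → s = h ∧ ' ' ∉ s := by
  induction s generalizing h with
  | nil =>
    intro hp
    simp [partitionSp] at hp
    simp [hp]
  | cons c rest ih =>
    intro hp
    by_cases hc : c = ' '
    · simp [partitionSp, hc] at hp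
    · rcases hq : partitionSp rest with ⟨h', t'?⟩
      simp [partitionSp, hc, hq] at hp
      cases t'? with
      | some t' => simp at hp
      | none =>
        simp at hp
        obtain ⟨hrest, hnot⟩ := ih h' hq
        subst hrest
        refine ⟨hp, ?_⟩
        simp [hnot]
        exact fun hcc => hc hcc.symm

theorem partitionSp_some (s : List Char) (h t : List Char) :
    partitionSp s = (h, some t) → s = h ++ ' ' :: t ∧ ' ' ∉ h := by
  induction s generalizing h t with
  | nil => intro hp; simp [partitionSp] at hp
  | cons c rest ih =>
    intro hp
    by_cases hc : c = ' '
    · simp [partitionSp, hc] at hp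
      simp [hp.1, hp.2, hc]
    · rcases hq : partitionSp rest with ⟨h', t'?⟩
      simp [partitionSp, hc, hq] at hp
      cases t'? with
      | none => simp at hp
      | some t' =>
        simp at hp
        obtain ⟨hrest, hnot⟩ := ih h' t' (by rw [hq, hp.2])
        subst hrest
        refine ⟨?_, ?_⟩
        · rw [← hp.1]
          simp [hp.2]
        · rw [← hp.1]
          simp [hnot]
          exact fun hcc => hc hcc.symm

theorem splitSp_no_space (s : List Char) (h : ' ' ∉ s) : splitSp s = [s] := by
  induction s with
  | nil => rfl
  | cons c rest ih =>
    simp at h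
    rw [splitSp, if_neg (fun hc => h.1 hc.symm), ih h.2]
    rfl

theorem splitSp_append (h t : List Char) (hh : ' ' ∉ h) :
    splitSp (h ++ ' ' :: t) = h :: splitSp t := by
  induction h with
  | nil => simp [splitSp]
  | cons c h' ih =>
    simp at hh
    rw [List.cons_append, splitSp, if_neg (fun hc => hh.1 hc.symm),
      ih hh.2]
    rfl

theorem removeRTgo_eq_altGo (n : Nat) : ∀ (s : List Char), s.length ≤ n → ∀ (acc : List Char),
    removeRTgo (splitSp s) acc = acc ++ removeRTaltGo s := by
  induction n with
  | zero =>
    intro s hs acc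
    have hs0 : s = [] := by cases s <;> simp_all
    subst hs0
    rw [removeRTaltGo]
    simp [partitionSp, splitSp, removeRTgo]
    split_ifs <;> simp [removeRTgo]
  | succ n ih =>
    intro s hs acc
    rw [removeRTaltGo]
    split
    rename_i head tail? hp
    split_ifs with hrt
    · cases tail? with
      | none =>
        obtain ⟨hse, hns⟩ := partitionSp_none s head hp
        subst hse
        rw [splitSp_no_space s hns]
        simp [removeRTgo, hrt]
      | some t =>
        obtain ⟨hse, hnh⟩ := partitionSp_some s head t hp
        rw [hse, splitSp_append head t hnh]
        simp [removeRTgo, hrt]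
    · split
      · rename_i hnone
        obtain ⟨hse, hns⟩ := partitionSp_none s head hp
        subst hse
        rw [splitSp_no_space s hns]
        simp [removeRTgo, hrt]
      · rename_i t hsome
        obtain ⟨hse, hnh⟩ := partitionSp_some s head t hp
        rw [hse, splitSp_append head t hnh]
        rw [show removeRTgo (head :: splitSp t) acc
              = removeRTgo (splitSp t) (acc ++ head ++ [' ']) by simp [removeRTgo, hrt]]
        have ht : t.length ≤ n := by
          have := partitionSp_some_len s head t hp
          omega
        rw [ih t ht (acc ++ head ++ [' '])]
        simp

-- ===== VERDICT (by name: the statement is the Claim_ definition above) =====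
theorem removeRT_spec : Claim_equal_removeRT := by
  intro tweet _
  unfold Spec_removeRT removeRT removeRT_alt
  rw [splitOn_eq_splitSp, removeRTgo_eq_altGo tweet.toList.length tweet.toList le_rfl []]
  simp
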